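-- pv_equiv track=rewrite | github.com/QuantSysBio/inSPIRE | inspire/accession.py | get_invitro_spi_acc_group
-- ===== SOURCE A (Python) =====
-- ACCESSION_SPLITTERS = {
--     'mascot': ',',
--     'msfragger': ',',
--     'maxquant': ';',
--     'peaks': ':',
-- }
--
-- def get_invitro_spi_acc_group(accession, search_engine):
--     """ Function to get the accession group of a PSM from the accession column in invitroSPI
--         format.
--
--     Parameters
--     ----------
--     accession : str
--         The accession of a PSM.
--     search_engine : str
--         The search engine from which the results were generated.
--
--     Returns
--     -------
--     assignment : int
--         The accession group index as defined by the config.accession_hierarchy.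
--     """
--     splitter = ACCESSION_SPLITTERS.get(search_engine)
--     if splitter is None:
--         raise ValueError(f'Unrecognised Search Engine: {search_engine}')
--
--     all_possible_accessions = accession.split(splitter)
--     assignment = 0
--     for individiual_accession in all_possible_accessions:
--         if 'PCP_' in individiual_accession:
--             return 0
--         if 'PSP_' in individiual_accession:
--             assignment = 1
--
--     return assignment
-- ===== SOURCE B (Python) =====
-- ACCESSION_SPLITTERS = {
--     'mascot': ',',
--     'msfragger': ',',
--     'maxquant': ';',
--     'peaks': ':',
-- }
--
-- def get_invitro_spi_acc_group(accession, search_engine):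
--     """Accession-group classification done directly on the whole accession string:
--     no delimiter of ACCESSION_SPLITTERS can occur inside 'PCP_' or 'PSP_', so
--     substring presence in some split piece equals presence in the full string."""
--     if search_engine not in ACCESSION_SPLITTERS:
--         raise ValueError(f'Unrecognised Search Engine: {search_engine}')
--     if 'PCP_' in accession:
--         return 0
--     if 'PSP_' in accession:
--         return 1
--     return 0
-- ===== Notes on version B (the rewrite author's own statement) =====
-- stated objective: simpler
-- what changed: B drops the split-and-loop entirely: since no splitter character (',',';',':') can occur inside 'PCP_' or 'PSP_', it tests the two substrings once on the whole accession string (keeping the unknown-search-engine ValueError guard).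
import Mathlib
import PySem

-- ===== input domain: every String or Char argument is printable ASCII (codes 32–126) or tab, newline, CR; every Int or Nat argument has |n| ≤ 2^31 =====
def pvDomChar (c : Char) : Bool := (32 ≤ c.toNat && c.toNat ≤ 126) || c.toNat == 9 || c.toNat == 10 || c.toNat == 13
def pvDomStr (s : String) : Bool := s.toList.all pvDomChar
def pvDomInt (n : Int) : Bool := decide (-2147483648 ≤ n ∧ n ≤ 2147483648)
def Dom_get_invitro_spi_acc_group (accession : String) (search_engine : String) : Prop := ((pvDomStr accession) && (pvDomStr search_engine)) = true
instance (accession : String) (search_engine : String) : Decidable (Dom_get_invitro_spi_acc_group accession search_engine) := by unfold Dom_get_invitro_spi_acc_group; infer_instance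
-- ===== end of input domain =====

-- B replaces A's split-and-scan loop by two substring tests on the whole accession
-- string (valid because no splitter character occurs inside 'PCP_'/'PSP_'); objective: simpler.

-- ===== PORT A =====
def pvAccessionSplitters : PySem.Dict String String :=
  PySem.Dict.ofList [("mascot", ","), ("msfragger", ","), ("maxquant", ";"), ("peaks", ":")]

-- the for-loop over all_possible_accessions, carrying 'assignment'
def pvLoopA : List String → Int → Int
  | [], assignment => assignment
  | p :: rest, assignment =>
      if PySem.Str.isIn "PCP_" p then 0
      else pvLoopA rest (if PySem.Str.isIn "PSP_" p then 1 else assignment)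

def get_invitro_spi_acc_group (accession : String) (search_engine : String) : Int :=
  match pvAccessionSplitters.get? search_engine with
  | none => 0      -- Python raises ValueError here; excluded by Pre_
  | some splitter =>
      match PySem.Str.split? accession splitter with
      | none => 0  -- unreachable: every splitter in the dict is nonempty
      | some pieces => pvLoopA pieces 0

-- ===== PORT B =====
def get_invitro_spi_acc_group_alt (accession : String) (search_engine : String) : Int :=
  if pvAccessionSplitters.contains search_engine then
    if PySem.Str.isIn "PCP_" accession then 0
    else if PySem.Str.isIn "PSP_" accession then 1
    else 0
  else 0           -- Python raises ValueError here; excluded by Pre_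

-- ===== PRECONDITION & SPEC =====
-- Pre_ excludes exactly the search engines outside ACCESSION_SPLITTERS, on which A raises ValueError.
def Pre_get_invitro_spi_acc_group (accession : String) (search_engine : String) : Prop :=
  search_engine ∈ (["mascot", "msfragger", "maxquant", "peaks"] : List String)
instance (accession : String) (search_engine : String) : Decidable (Pre_get_invitro_spi_acc_group accession search_engine) := by unfold Pre_get_invitro_spi_acc_group; infer_instance

def pvWitness_get_invitro_spi_acc_group : String × String := ("PSP_ab,PCP_cd", "mascot")

def Spec_get_invitro_spi_acc_group (accession : String) (search_engine : String) (out : Int) : Prop := out = get_invitro_spi_acc_group_alt accession search_engine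
instance (accession : String) (search_engine : String) (out : Int) : Decidable (Spec_get_invitro_spi_acc_group accession search_engine out) := by unfold Spec_get_invitro_spi_acc_group; infer_instance

-- ===== CLAIM (what is proved, stated in full; the proofs are below) =====
def Claim_equal_get_invitro_spi_acc_group : Prop := ∀ (accession : String) (search_engine : String), Dom_get_invitro_spi_acc_group accession search_engine → Pre_get_invitro_spi_acc_group accession search_engine → Spec_get_invitro_spi_acc_group accession search_engine (get_invitro_spi_acc_group accession search_engine)

-- ===== LEMMAS AND PROOFS =====

-- a pure structural model of splitting on a single character
def pvSplitC (c : Char) : List Char → List (List Char)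
  | [] => [[]]
  | x :: rest =>
      if x = c then [] :: pvSplitC c rest
      else
        match pvSplitC c rest with
        | [] => [[x]]
        | h :: t => (x :: h) :: t

theorem pvSplitC_head (c : Char) (l : List Char) :
    ∃ t, pvSplitC c l = (l.takeWhile (· ≠ c)) :: t := by
  induction l with
  | nil => exact ⟨[], rfl⟩
  | cons x rest ih =>
    obtain ⟨t, ht⟩ := ih
    by_cases hx : x = c
    · subst hx
      refine ⟨pvSplitC x rest, ?_⟩
      simp [pvSplitC, List.takeWhile]
    · refine ⟨t, ?_⟩
      simp [pvSplitC, hx, ht, List.takeWhile]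

theorem pvPrefix_takeWhile (c : Char) (p l : List Char) (hc : c ∉ p) (hp : p <+: l) :
    p <+: l.takeWhile (· ≠ c) := by
  induction p generalizing l with
  | nil => exact List.nil_prefix
  | cons y p' ih =>
    cases l with
    | nil => simp at hp
    | cons z l' =>
      obtain ⟨hy, hp'⟩ := (List.cons_prefix_cons).mp hp
      subst hy
      have hyc : y ≠ c := fun h => hc (h ▸ List.mem_cons_self)
      have h2 : p' <+: List.takeWhile (fun x => decide (x ≠ c)) l' := ih l' (fun h => hc (List.mem_cons_of_mem _ h)) hp'
      have h3 : y :: p' <+: y :: List.takeWhile (fun x => decide (x ≠ c)) l' := (List.cons_prefix_cons).mpr ⟨rfl, h2⟩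
      simpa [List.takeWhile, hyc] using h3

theorem pvSplitC_any_isIn (c : Char) (sub : List Char) (hne : sub ≠ [])
    (hc : c ∉ sub) (l : List Char) :
    (pvSplitC c l).any (fun p => PySem.Chars.isIn sub p) = PySem.Chars.isIn sub l := by
  induction l with
  | nil => simp [pvSplitC]
  | cons x rest ih =>
    have hnilFalse : PySem.Chars.isIn sub [] = false := by
      rw [PySem.Chars.isIn_eq_false_iff]
      intro h
      exact hne (List.eq_nil_of_infix_nil h)
    by_cases hx : x = c
    · subst hx
      have hRHS : PySem.Chars.isIn sub (x :: rest) = PySem.Chars.isIn sub rest := by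
        rcases hb : PySem.Chars.isIn sub rest with _ | _
        · rw [PySem.Chars.isIn_eq_false_iff] at hb ⊢
          intro h
          rcases List.infix_cons_iff.mp h with h1 | h2
          · cases sub with
            | nil => exact hne rfl
            | cons s0 s' =>
              obtain ⟨h0, _⟩ := List.cons_prefix_cons.mp h1
              exact hc (h0 ▸ List.mem_cons_self)
          · exact hb h2
        · rw [PySem.Chars.isIn_iff_infix] at hb ⊢
          exact hb.trans (List.suffix_cons x rest).isInfix
      simp [pvSplitC, hnilFalse, ih, hRHS]
    · obtain ⟨t, ht⟩ := pvSplitC_head c rest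
      have hLHS : (pvSplitC c (x :: rest)).any (fun p => PySem.Chars.isIn sub p)
          = (PySem.Chars.isIn sub (x :: rest.takeWhile (· ≠ c)) || t.any fun p => PySem.Chars.isIn sub p) := by
        simp [pvSplitC, hx, ht]
      rw [hLHS]
      rw [ht] at ih
      simp only [List.any_cons] at ih
      rcases htail : t.any (fun p => PySem.Chars.isIn sub p) with _ | _
      · rw [htail] at ih
        rw [Bool.or_false] at ih ⊢
        -- goal: isIn sub (x :: takeWhile rest) = isIn sub (x :: rest), given isIn sub takeWhile = isIn sub rest
        rcases hb : PySem.Chars.isIn sub (x :: rest) with _ | _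
        · rw [PySem.Chars.isIn_eq_false_iff] at hb ⊢
          intro h
          rcases List.infix_cons_iff.mp h with h1 | h2
          · refine hb (List.infix_cons_iff.mpr (Or.inl ?_))
            cases sub with
            | nil => exact absurd rfl hne
            | cons s0 s' =>
              obtain ⟨h0, hp'⟩ := List.cons_prefix_cons.mp h1
              exact List.cons_prefix_cons.mpr ⟨h0, hp'.trans (List.takeWhile_prefix _)⟩
          · have htw : PySem.Chars.isIn sub (rest.takeWhile (· ≠ c)) = true :=
              (PySem.Chars.isIn_iff_infix sub _).mpr h2
            have hrest : sub <:+: rest :=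
              (PySem.Chars.isIn_iff_infix sub rest).mp (ih ▸ htw)
            exact hb (hrest.trans (List.suffix_cons x rest).isInfix)
        · rw [PySem.Chars.isIn_iff_infix] at hb ⊢
          rcases List.infix_cons_iff.mp hb with h1 | h2
          · refine List.infix_cons_iff.mpr (Or.inl ?_)
            cases sub with
            | nil => exact absurd rfl hne
            | cons s0 s' =>
              obtain ⟨h0, hp'⟩ := List.cons_prefix_cons.mp h1
              have hcs' : c ∉ s' := fun h => hc (List.mem_cons_of_mem _ h)
              exact List.cons_prefix_cons.mpr ⟨h0, pvPrefix_takeWhile c s' rest hcs' hp'⟩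
          · refine List.infix_cons_iff.mpr (Or.inr ?_)
            have hrest : PySem.Chars.isIn sub rest = true :=
              (PySem.Chars.isIn_iff_infix sub rest).mpr h2
            exact (PySem.Chars.isIn_iff_infix sub _).mp (ih.symm ▸ hrest)
      · rw [htail] at ih
        simp only [Bool.or_true] at ih ⊢
        rcases hb : PySem.Chars.isIn sub (x :: rest) with _ | _
        · have hrest : sub <:+: rest := (PySem.Chars.isIn_iff_infix sub rest).mp ih.symm
          rw [PySem.Chars.isIn_eq_false_iff] at hb
          exact absurd (hrest.trans (List.suffix_cons x rest).isInfix) hb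
        · rfl

theorem pvGo_step (c x : Char) (f : Nat) (rest cur : List Char) (acc : List (List Char)) :
    PySem.Chars.splitOn.go [c] (f+1) (x::rest) cur acc =
      if x = c then PySem.Chars.splitOn.go [c] f rest [] (cur.reverse :: acc)
      else PySem.Chars.splitOn.go [c] f rest (x :: cur) acc := by
  rw [PySem.Chars.splitOn.go.eq_def]
  by_cases hx : x = c
  · subst hx; simp [List.isPrefixOf]
  · simp [List.isPrefixOf, hx, show ¬ c = x from fun h => hx h.symm]

-- Chars.splitOn on a single-character separator computes pvSplitC
theorem pvGo_eq (c : Char) (l : List Char) :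
    ∀ (fuel : Nat) (cur : List Char) (acc : List (List Char)), l.length ≤ fuel →
    PySem.Chars.splitOn.go [c] fuel l cur acc
      = acc.reverse ++ (pvSplitC c l).modifyHead (cur.reverse ++ ·) := by
  induction l with
  | nil =>
    intro fuel cur acc _
    rw [PySem.Chars.splitOn.go.eq_def]
    cases fuel <;> simp [pvSplitC]
  | cons x rest ih =>
    intro fuel cur acc hf
    cases fuel with
    | zero => simp at hf
    | succ f =>
      have hf' : rest.length ≤ f := by simpa using hf
      rw [pvGo_step]
      by_cases hx : x = c
      · subst hx
        rw [if_pos rfl, ih f [] (cur.reverse :: acc) hf']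
        simp [pvSplitC, List.modifyHead]
        cases pvSplitC x rest <;> rfl
      · rw [if_neg hx, ih f (x :: cur) acc hf']
        obtain ⟨t, ht⟩ := pvSplitC_head c rest
        simp [pvSplitC, hx, ht, List.modifyHead]

theorem pvSplitOn_eq (c : Char) (l : List Char) :
    PySem.Chars.splitOn l [c] = pvSplitC c l := by
  have := pvGo_eq c l (l.length + 1) [] [] (by omega)
  unfold PySem.Chars.splitOn
  simp only [] at this ⊢
  rw [this]
  rcases pvSplitC_head c l with ⟨t, ht⟩
  simp [ht, List.modifyHead]

-- the loop computes: 0 if some piece has PCP_, else 1 if some piece has PSP_, else the accumulator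
theorem pvLoopA_char (ps : List String) :
    ∀ a, pvLoopA ps a =
      if ps.any (fun p => PySem.Str.isIn "PCP_" p) then 0
      else if ps.any (fun p => PySem.Str.isIn "PSP_" p) then 1 else a := by
  induction ps with
  | nil => intro a; simp [pvLoopA]
  | cons p rest ih =>
    intro a
    rcases h1 : PySem.Chars.isIn ['P','C','P','_'] p.toList with _ | _ <;>
      rcases h2 : PySem.Chars.isIn ['P','S','P','_'] p.toList with _ | _ <;>
        rcases hr1 : rest.any (fun q => PySem.Chars.isIn ['P','C','P','_'] q.toList) with _ | _ <;>
          rcases hr2 : rest.any (fun q => PySem.Chars.isIn ['P','S','P','_'] q.toList) with _ | _ <;>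
            simp [pvLoopA, PySem.Str.isIn, h1, h2, hr1, hr2, ih, -List.any_eq_true]

theorem pvMain (c : Char) (hc1 : c ∉ "PCP_".toList) (hc2 : c ∉ "PSP_".toList) (s : List Char) :
    pvLoopA ((PySem.Chars.splitOn s [c]).map String.ofList) 0
      = if PySem.Chars.isIn "PCP_".toList s then 0
        else if PySem.Chars.isIn "PSP_".toList s then 1 else 0 := by
  rw [pvLoopA_char]
  have hb : ∀ sub : String, ((PySem.Chars.splitOn s [c]).map String.ofList).any (fun p => PySem.Str.isIn sub p)
      = (pvSplitC c s).any (fun p => PySem.Chars.isIn sub.toList p) := by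
    intro sub
    rw [pvSplitOn_eq]
    simp [List.any_map, PySem.Str.isIn, Function.comp_def, String.toList_ofList]
  rw [hb, hb]
  rw [pvSplitC_any_isIn c "PCP_".toList (by decide) hc1 s]
  rw [pvSplitC_any_isIn c "PSP_".toList (by decide) hc2 s]

theorem pvEngine (accession : String) (se : String) (c : Char)
    (hget : pvAccessionSplitters.get? se = some (String.ofList [c]))
    (hcon : pvAccessionSplitters.contains se = true)
    (hc1 : c ∉ "PCP_".toList) (hc2 : c ∉ "PSP_".toList) :
    get_invitro_spi_acc_group accession se = get_invitro_spi_acc_group_alt accession se := by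
  unfold get_invitro_spi_acc_group get_invitro_spi_acc_group_alt
  rw [hget, if_pos hcon]
  have hsplit : PySem.Str.split? accession (String.ofList [c]) =
      some ((PySem.Chars.splitOn accession.toList [c]).map String.ofList) := by
    simp [PySem.Str.split?, PySem.Chars.split?, String.toList_ofList, List.isEmpty]
  show (match PySem.Str.split? accession (String.ofList [c]) with
        | none => (0 : Int)
        | some pieces => pvLoopA pieces 0) = _
  rw [hsplit]
  show pvLoopA ((PySem.Chars.splitOn accession.toList [c]).map String.ofList) 0 = _
  rw [pvMain c hc1 hc2 accession.toList]
  rfl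

-- ===== VERDICT (by name: the statement is the Claim_ definition above) =====
theorem get_invitro_spi_acc_group_spec : Claim_equal_get_invitro_spi_acc_group := by
  intro accession search_engine _ hpre
  unfold Spec_get_invitro_spi_acc_group
  unfold Pre_get_invitro_spi_acc_group at hpre
  fin_cases hpre
  · exact pvEngine accession "mascot" ',' (by decide) (by decide) (by decide) (by decide)
  · exact pvEngine accession "msfragger" ',' (by decide) (by decide) (by decide) (by decide)
  · exact pvEngine accession "maxquant" ';' (by decide) (by decide) (by decide) (by decide)
  · exact pvEngine accession "peaks" ':' (by decide) (by decide) (by decide) (by decide)
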